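-- pv_equiv track=rewrite | github.com/ncoder-ai/kahani | backend/app/services/entity_state_service.py | _normalize_character_name
-- ===== SOURCE A (Python) =====
-- from typing import Dict, Any, List, Optional
--
-- def _normalize_character_name(name: str, canonical_names: List[str]) -> str:
--     """Normalize an extracted character name to match a canonical name.
--
--     Uses exact match first, then case-insensitive, then substring matching.
--     """
--     if not name or not canonical_names:
--         return name
--
--     name_stripped = name.strip()
--
--     # Exact match
--     for cn in canonical_names:
--         if cn == name_stripped:
--             return cn
--
--     # Case-insensitive match
--     name_lower = name_stripped.lower()
--     for cn in canonical_names: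
--         if cn.lower() == name_lower:
--             return cn
--
--     # Substring match: extracted name is part of canonical name (e.g. "Ali" -> "Ali Malik")
--     # or canonical name is part of extracted name (e.g. "Ali Malik" -> "Ali")
--     for cn in canonical_names:
--         cn_lower = cn.lower()
--         if name_lower in cn_lower or cn_lower in name_lower:
--             return cn
--
--     # First-name match: compare first word
--     name_first = name_lower.split()[0] if name_lower.split() else name_lower
--     for cn in canonical_names:
--         cn_first = cn.lower().split()[0] if cn.lower().split() else cn.lower()
--         if name_first == cn_first:
--             return cn
--
--     return name_stripped  # Return as-is if no match
-- ===== SOURCE B (Python) =====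
-- def _normalize_character_name(name, canonical_names):
--     """Single pass: classify each candidate into a match tier (1 exact, 2
--     case-insensitive, 3 substring, 4 first-word) and keep the first candidate
--     of the best (lowest) tier."""
--     if not name or not canonical_names:
--         return name
--     ns = name.strip()
--     nl = ns.lower()
--     words = nl.split()
--     nf = words[0] if words else nl
--
--     def tier(cn):
--         if cn == ns:
--             return 1
--         cl = cn.lower()
--         if cl == nl:
--             return 2
--         if nl in cl or cl in nl:
--             return 3
--         cw = cl.split()
--         if (cw[0] if cw else cl) == nf:
--             return 4
--         return None
--
--     best = None
--     for cn in canonical_names: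
--         t = tier(cn)
--         if t is not None and (best is None or t < best[0]):
--             best = (t, cn)
--     return best[1] if best is not None else ns
-- ===== Notes on version B (the rewrite author's own statement) =====
-- stated objective: simpler
-- what changed: Replaces A's four sequential full scans (exact, case-insensitive, substring, first-word) by one single pass that assigns each candidate a match tier and keeps the first candidate of the lowest tier.
import Mathlib
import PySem

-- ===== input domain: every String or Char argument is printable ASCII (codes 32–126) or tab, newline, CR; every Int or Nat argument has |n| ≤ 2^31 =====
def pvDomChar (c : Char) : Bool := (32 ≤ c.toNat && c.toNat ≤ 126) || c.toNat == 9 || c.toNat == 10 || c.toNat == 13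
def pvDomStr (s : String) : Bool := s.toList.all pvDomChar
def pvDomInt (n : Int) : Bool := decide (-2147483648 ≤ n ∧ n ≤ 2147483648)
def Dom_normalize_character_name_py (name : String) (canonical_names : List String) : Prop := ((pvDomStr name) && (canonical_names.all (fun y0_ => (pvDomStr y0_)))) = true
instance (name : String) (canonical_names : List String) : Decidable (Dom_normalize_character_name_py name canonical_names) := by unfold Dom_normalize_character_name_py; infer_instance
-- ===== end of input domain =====

-- B replaces A's four sequential full scans by ONE pass assigning each candidate a
-- match tier (1 exact, 2 case-insensitive, 3 substring, 4 first-word) and keeping the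
-- first candidate of the lowest tier; objective: simpler (one scan instead of four).

-- ===== PORT A =====
-- literal transliteration of A: each early-return 'for' loop is a List.find?
def normalize_character_name_py (name : String) (canonical_names : List String) : String :=
  if name == "" || canonical_names == [] then name
  else
    let name_stripped := PySem.Str.strip name
    match canonical_names.find? (fun cn => cn == name_stripped) with
    | some cn => cn
    | none =>
      let name_lower := PySem.Str.lower name_stripped
      match canonical_names.find? (fun cn => PySem.Str.lower cn == name_lower) with
      | some cn => cn
      | none =>
        match canonical_names.find? (fun cn =>
            PySem.Str.isIn name_lower (PySem.Str.lower cn) ||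
            PySem.Str.isIn (PySem.Str.lower cn) name_lower) with
        | some cn => cn
        | none =>
          let name_first := match PySem.Str.split₀ name_lower with
            | [] => name_lower
            | w :: _ => w
          match canonical_names.find? (fun cn =>
              (match PySem.Str.split₀ (PySem.Str.lower cn) with
               | [] => PySem.Str.lower cn
               | w :: _ => w) == name_first) with
          | some cn => cn
          | none => name_stripped

-- ===== PORT B =====
-- first word of s, or s itself if it has no words (Source B's "cw[0] if cw else cl")
def pvFirstWord (s : String) : String :=
  match PySem.Str.split₀ s with
  | [] => s
  | w :: _ => w

-- Source B's tier classifier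
def pvTier (ns nl nf cn : String) : Option Nat :=
  if cn == ns then some 1
  else
    let cl := PySem.Str.lower cn
    if cl == nl then some 2
    else if PySem.Str.isIn nl cl || PySem.Str.isIn cl nl then some 3
    else if pvFirstWord cl == nf then some 4
    else none

def normalize_character_name_py_alt (name : String) (canonical_names : List String) : String :=
  if name == "" || canonical_names == [] then name
  else
    let ns := PySem.Str.strip name
    let nl := PySem.Str.lower ns
    let nf := pvFirstWord nl
    match canonical_names.foldl (fun (best : Option (Nat × String)) cn =>
        match pvTier ns nl nf cn with
        | none => best
        | some t =>
          match best with
          | none => some (t, cn)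
          | some (bt, _) => if t < bt then some (t, cn) else best) none with
    | some (_, cn) => cn
    | none => ns

-- ===== PRECONDITION & SPEC =====
def Spec_normalize_character_name_py (name : String) (canonical_names : List String) (out : String) : Prop := out = normalize_character_name_py_alt name canonical_names
instance (name : String) (canonical_names : List String) (out : String) : Decidable (Spec_normalize_character_name_py name canonical_names out) := by unfold Spec_normalize_character_name_py; infer_instance

-- ===== CLAIM (what is proved, stated in full; the proofs are below) =====
def Claim_equal_normalize_character_name_py : Prop := ∀ (name : String) (canonical_names : List String), Dom_normalize_character_name_py name canonical_names → Spec_normalize_character_name_py name canonical_names (normalize_character_name_py name canonical_names)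

-- ===== LEMMAS AND PROOFS =====

-- generic four-tier machinery, abstracted over the four predicates
def gTier {α : Type} (p1 p2 p3 p4 : α → Bool) (a : α) : Option Nat :=
  if p1 a then some 1 else if p2 a then some 2 else if p3 a then some 3
  else if p4 a then some 4 else none

def gStep {α : Type} (p1 p2 p3 p4 : α → Bool)
    (best : Option (Nat × α)) (a : α) : Option (Nat × α) :=
  match gTier p1 p2 p3 p4 a with
  | none => best
  | some t =>
    match best with
    | none => some (t, a)
    | some (bt, _) => if t < bt then some (t, a) else best

-- A's four sequential scans, paired with the tier each pass represents
def gBest {α : Type} (p1 p2 p3 p4 : α → Bool) (l : List α) : Option (Nat × α) :=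
  match l.find? p1 with
  | some c => some (1, c)
  | none =>
    match l.find? p2 with
    | some c => some (2, c)
    | none =>
      match l.find? p3 with
      | some c => some (3, c)
      | none =>
        match l.find? p4 with
        | some c => some (4, c)
        | none => none

def gMerge {α : Type} (acc b : Option (Nat × α)) : Option (Nat × α) :=
  match b with
  | none => acc
  | some (t, c) =>
    match acc with
    | none => some (t, c)
    | some (bt, _) => if t < bt then some (t, c) else acc

def gCand {α : Type} (p1 p2 p3 p4 : α → Bool) (a : α) : Option (Nat × α) :=
  (gTier p1 p2 p3 p4 a).map (fun t => (t, a))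

-- left-biased merge: keep the left candidate unless the right one is strictly better
def gMergeL {α : Type} (x y : Option (Nat × α)) : Option (Nat × α) :=
  match x with
  | none => y
  | some (t, c) =>
    match y with
    | none => some (t, c)
    | some (u, _) => if t ≤ u then some (t, c) else y

theorem gStep_eq_merge {α : Type} (p1 p2 p3 p4 : α → Bool) (acc : Option (Nat × α)) (a : α) :
    gStep p1 p2 p3 p4 acc a = gMerge acc (gCand p1 p2 p3 p4 a) := by
  unfold gStep gMerge gCand
  cases gTier p1 p2 p3 p4 a <;> rfl

theorem gMerge_gMerge {α : Type} (acc x y : Option (Nat × α)) :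
    gMerge (gMerge acc x) y = gMerge acc (gMergeL x y) := by
  rcases x with _ | ⟨t, c⟩ <;> rcases y with _ | ⟨u, d⟩ <;> rcases acc with _ | ⟨bt, c0⟩ <;>
    simp only [gMerge, gMergeL] <;>
    repeat (first | rfl | omega | split_ifs | simp)

theorem gBest_cons {α : Type} (p1 p2 p3 p4 : α → Bool) (a : α) (l : List α) :
    gBest p1 p2 p3 p4 (a :: l) = gMergeL (gCand p1 p2 p3 p4 a) (gBest p1 p2 p3 p4 l) := by
  simp only [gBest, gCand, gTier, List.find?_cons]
  cases h1 : p1 a <;> cases h2 : p2 a <;> cases h3 : p3 a <;> cases h4 : p4 a <;>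
    cases hf1 : l.find? p1 <;> cases hf2 : l.find? p2 <;> cases hf3 : l.find? p3 <;>
    cases hf4 : l.find? p4 <;> rfl

theorem gFold {α : Type} (p1 p2 p3 p4 : α → Bool) (l : List α) :
    ∀ acc, l.foldl (gStep p1 p2 p3 p4) acc = gMerge acc (gBest p1 p2 p3 p4 l) := by
  induction l with
  | nil => intro acc; cases acc <;> rfl
  | cons a l ih =>
    intro acc
    rw [List.foldl_cons, ih, gStep_eq_merge, gMerge_gMerge, gBest_cons]

theorem gMerge_none {α : Type} (b : Option (Nat × α)) : gMerge none b = b := by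
  rcases b with _ | ⟨t, c⟩ <;> rfl

-- ===== VERDICT (by name: the statement is the Claim_ definition above) =====
theorem normalize_character_name_py_spec : Claim_equal_normalize_character_name_py := by
  intro name cns _
  unfold Spec_normalize_character_name_py
  cases hg : (name == "" || cns == []) with
  | true =>
      simp only [normalize_character_name_py, normalize_character_name_py_alt, hg, if_true]
  | false =>
      simp only [normalize_character_name_py, normalize_character_name_py_alt, hg,
        Bool.false_eq_true, if_false]
      generalize PySem.Str.strip name = ns
      generalize PySem.Str.lower ns = nl
      rw [show pvFirstWord nl = (match PySem.Str.split₀ nl with | [] => nl | w :: _ => w) from rfl]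
      generalize (match PySem.Str.split₀ nl with | [] => nl | w :: _ => w) = nf
      have hstep : (fun (best : Option (Nat × String)) cn =>
            match pvTier ns nl nf cn with
            | none => best
            | some t =>
              match best with
              | none => some (t, cn)
              | some (bt, _) => if t < bt then some (t, cn) else best)
          = gStep (fun cn => cn == ns)
              (fun cn => PySem.Str.lower cn == nl)
              (fun cn => PySem.Str.isIn nl (PySem.Str.lower cn) ||
                         PySem.Str.isIn (PySem.Str.lower cn) nl)
              (fun cn => pvFirstWord (PySem.Str.lower cn) == nf) := by
        funext best cn
        dsimp only [gStep]
        rw [show pvTier ns nl nf cn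
            = gTier (fun cn => cn == ns)
                (fun cn => PySem.Str.lower cn == nl)
                (fun cn => PySem.Str.isIn nl (PySem.Str.lower cn) ||
                           PySem.Str.isIn (PySem.Str.lower cn) nl)
                (fun cn => pvFirstWord (PySem.Str.lower cn) == nf) cn from rfl]
        rcases gTier _ _ _ _ cn with _ | t <;> rcases best with _ | ⟨bt, c0⟩ <;> rfl
      rw [hstep, gFold, gMerge_none]
      rw [show (fun cn =>
            (match PySem.Str.split₀ (PySem.Str.lower cn) with
             | [] => PySem.Str.lower cn
             | w :: _ => w) == nf)
          = (fun cn => pvFirstWord (PySem.Str.lower cn) == nf) from rfl]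
      simp only [gBest]
      cases hf1 : List.find? (fun cn => cn == ns) cns <;>
        cases hf2 : List.find? (fun cn => PySem.Str.lower cn == nl) cns <;>
        cases hf3 : List.find? (fun cn => PySem.Str.isIn nl (PySem.Str.lower cn) ||
          PySem.Str.isIn (PySem.Str.lower cn) nl) cns <;>
        cases hf4 : List.find? (fun cn => pvFirstWord (PySem.Str.lower cn) == nf) cns <;> rfl
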